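-- pv_equiv track=rewrite | github.com/NiCrook/Ebabit_Exercises | 80-89/80.py | freed_prisoner
-- ===== SOURCE A (Python) =====
-- def freed_prisoner(prison: list):
--     cur_cell = 0
--     prisoners_free = 0
--
--     if prison[0] == 0:
--         return prisoners_free
--
--     while cur_cell != len(prison):
--         cur_ind = 0
--         if prison[cur_cell] == 0:
--             cur_cell += 1
--         else:
--             if 1 not in prison[1:]:
--                 prisoners_free += 1
--                 return prisoners_free
--             else:
--                 prisoners_free += 1
--                 cur_cell += 1
--                 while cur_ind != len(prison):
--                     if prison[cur_ind] == 1: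
--                         prison[cur_ind] = 0
--                         cur_ind += 1
--                     elif prison[cur_ind] == 0:
--                         prison[cur_ind] = 1
--                         cur_ind += 1
--
--     return prisoners_free
-- ===== SOURCE B (Python) =====
-- # B: single pass over the tail tracking a global flip-parity bit, with the
-- # tail's 1-count precomputed, instead of physically re-flipping the whole
-- # array each time a freed cell is found.
-- # Unlike A, B does not mutate its argument; the equivalence is on the return value.
-- def freed_prisoner(prison: list):
--     if prison[0] == 0:
--         return 0
--     tail = prison[1:]
--     if 1 not in tail:
--         return 1
--     ones = tail.count(1)          # cells after 0 currently holding a 1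
--     zeros = len(tail) - ones      # cells after 0 currently holding a 0
--     freed = 1                     # cell 0 was occupied and has been freed
--     parity = 1                    # one global flip has happened
--     for cell in tail:
--         if cell != parity:        # current value of this cell is nonzero
--             # is there still a 1 somewhere in prison[1:] after the flips?
--             if (ones if parity == 0 else zeros) == 0:
--                 return freed + 1
--             freed += 1
--             parity = 1 - parity
--     return freed
-- ===== Notes on version B (the rewrite author's own statement) =====
-- stated objective: alternative
-- what changed: B replaces A's repeated whole-array flip passes with a single scan over the tail that tracks a global flip-parity bit and uses precomputed counts of 1s and 0s in the tail for the 'any 1 left after cell 0' test.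
import Mathlib
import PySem

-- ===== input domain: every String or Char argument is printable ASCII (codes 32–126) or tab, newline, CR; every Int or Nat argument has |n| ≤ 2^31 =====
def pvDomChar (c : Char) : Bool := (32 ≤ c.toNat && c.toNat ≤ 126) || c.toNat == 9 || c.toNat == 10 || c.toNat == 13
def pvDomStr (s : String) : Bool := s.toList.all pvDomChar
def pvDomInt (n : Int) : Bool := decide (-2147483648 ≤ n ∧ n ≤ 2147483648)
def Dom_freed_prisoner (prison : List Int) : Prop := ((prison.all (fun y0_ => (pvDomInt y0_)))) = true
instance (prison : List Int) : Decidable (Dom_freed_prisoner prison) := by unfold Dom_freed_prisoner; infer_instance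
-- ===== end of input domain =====

-- B changes the algorithm (one parity-tracking pass instead of repeated whole-array
-- flips); A mutates its argument in place, B does not — the equivalence proved here
-- is about the return value only.

-- ===== PORT A =====
-- inner while loop: scans cur_ind left to right, flipping prison[cur_ind]
-- (1→0, 0→1); on a cell holding neither 0 nor 1 the Python loop never advances
-- (divergence) → none here
def flipGo : List Int → Option (List Int)
  | [] => some []
  | v :: r =>
    if v = 1 then (flipGo r).map (fun r' => 0 :: r')
    else if v = 0 then (flipGo r).map (fun r' => 1 :: r')
    else none

-- outer while loop, with the array held as a zipper: done = cells before
-- cur_cell, todo = cells from cur_cell on (so the full array is done ++ todo).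
-- Every iteration advances cur_cell or returns, so the loop runs at most
-- len(prison) times: fuel = len(prison) makes the 0-fuel arm unreachable
-- (a guard for totality only; divergence of the flip pass is the none above).
def outerGo : Nat → List Int → List Int → Int → Option Int
  | _, _, [], f => some f                                 -- cur_cell == len: exit
  | 0, _, _ :: _, _ => none                               -- unreachable fuel guard
  | Nat.succ fuel, done, v :: r, f =>
    if v = 0 then outerGo fuel (done ++ [v]) r f          -- cur_cell += 1
    else if (1 : Int) ∉ (done ++ v :: r).drop 1 then some (f + 1)
    else                                                  -- free, advance, flip all
      match flipGo (done ++ [v]) with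
      | none => none
      | some d' =>
        match flipGo r with
        | none => none
        | some r' => outerGo fuel d' r' (f + 1)

def freed_prisoner (prison : List Int) : Int :=
  match PySem.List.pyGet? prison 0 with
  | none => 0                                   -- IndexError on []; excluded by Pre_
  | some v =>
    if v = 0 then 0
    else (outerGo prison.length [] prison 0).getD 0   -- none = divergence; excluded by Pre_

-- ===== PORT B =====
def altLoop (cells : List Int) (ones zeros freed parity : Int) : Int :=
  match cells with
  | [] => freed
  | cell :: rest =>
    if cell ≠ parity then
      if (if parity = 0 then ones else zeros) = 0 then freed + 1
      else altLoop rest ones zeros (freed + 1) (1 - parity)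
    else altLoop rest ones zeros freed parity

def freed_prisoner_alt (prison : List Int) : Int :=
  match PySem.List.pyGet? prison 0 with
  | none => 0                                   -- prison[0] raises on [] too
  | some v =>
    if v = 0 then 0
    else
      let tail := prison.drop 1                 -- prison[1:]
      if (1 : Int) ∉ tail then 1
      else
        let ones : Int := PySem.List.count tail 1
        let zeros : Int := (tail.length : Int) - ones
        altLoop tail ones zeros 1 1

-- ===== PRECONDITION & SPEC =====
-- Pre_ excludes exactly the inputs on which A does not return: the empty list
-- (IndexError on prison[0]) and the lists on which A's flip pass runs forever
-- (cell 0 occupied, a 1 somewhere in prison[1:], and some cell outside {0,1},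
-- so the inner while never advances past that cell).
def Pre_freed_prisoner (prison : List Int) : Prop :=
  prison ≠ [] ∧
    (prison.headI = 0 ∨ (1 : Int) ∉ prison.drop 1 ∨ ∀ x ∈ prison, x = 0 ∨ x = 1)
instance (prison : List Int) : Decidable (Pre_freed_prisoner prison) := by
  unfold Pre_freed_prisoner; infer_instance

def pvWitness_freed_prisoner : List Int := [1, 0, 1, 1, 0]

def Spec_freed_prisoner (prison : List Int) (out : Int) : Prop := out = freed_prisoner_alt prison
instance (prison : List Int) (out : Int) : Decidable (Spec_freed_prisoner prison out) := by
  unfold Spec_freed_prisoner; infer_instance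

-- ===== CLAIM (what is proved, stated in full; the proofs are below) =====
def Claim_equal_freed_prisoner : Prop := ∀ (prison : List Int), Dom_freed_prisoner prison → Pre_freed_prisoner prison → Spec_freed_prisoner prison (freed_prisoner prison)

-- ===== LEMMAS AND PROOFS =====

-- the flip pass, on a 0/1 list, maps every cell to 1 - x
theorem flipGo_spec (l : List Int) (h : ∀ x ∈ l, x = 0 ∨ x = 1) :
    flipGo l = some (l.map (fun x => 1 - x)) := by
  induction l with
  | nil => rfl
  | cons v r ih =>
    have hr := ih (fun x hx => h x (by simp [hx]))
    rcases h v (by simp) with h0 | h1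
    · rw [flipGo, if_neg (by omega), if_pos h0, hr]
      simp [h0]
    · rw [flipGo, if_pos h1, hr]
      simp [h1]

-- unfold one outer-loop iteration through the matches on the flip pass
theorem outerGo_flip (fuel : Nat) (done d' r' : List Int) (v : Int) (r : List Int) (f : Int)
    (hv : ¬ v = 0) (hm : ¬ (1 : Int) ∉ (done ++ v :: r).drop 1)
    (hd : flipGo (done ++ [v]) = some d') (hr : flipGo r = some r') :
    outerGo (fuel + 1) done (v :: r) f = outerGo fuel d' r' (f + 1) := by
  rw [outerGo, if_neg hv, if_neg hm]
  split
  · rename_i heq; rw [hd] at heq; cases heq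
  · rename_i q hq; rw [hd] at hq; injection hq with hq; subst hq
    split
    · rename_i heq; rw [hr] at heq; cases heq
    · rename_i q' hq'; rw [hr] at hq'; injection hq' with hq'; subst hq'; rfl

theorem count_zero_add_count_one (l : List Int) (h : ∀ x ∈ l, x = 0 ∨ x = 1) :
    l.count 0 + l.count 1 = l.length := by
  induction l with
  | nil => simp
  | cons v r ih =>
    have hr := ih (fun x hx => h x (by simp [hx]))
    rcases h v (by simp) with h0 | h1
    · simp [h0]; omega
    · simp [h1]; omega

theorem mem_one_map_flip (l : List Int) : (1 : Int) ∈ l.map (fun x => 1 - x) ↔ (0 : Int) ∈ l := by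
  simp only [List.mem_map]
  constructor
  · rintro ⟨x, hx, he⟩
    have : x = 0 := by omega
    simpa [this] using hx
  · intro h; exact ⟨0, h, by norm_num⟩

theorem map_flip_flip (l : List Int) : (l.map (fun x => 1 - x)).map (fun x => 1 - x) = l := by
  simp [List.map_map]

-- the heart: A's outer loop on the zipper of the (possibly once-flipped) array
-- equals B's parity-tracking pass over the remaining original cells
theorem outer_eq_alt (a : List Int) (ha : ∀ x ∈ a, x = 0 ∨ x = 1) :
    ∀ fuel todo done f t, todo.length ≤ fuel → (t = 0 ∨ t = 1) →
    done ++ todo = (if t = 1 then a.map (fun x => 1 - x) else a) →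
    outerGo fuel done todo f =
      some (altLoop (if t = 1 then todo.map (fun x => 1 - x) else todo)
        ((a.drop 1).count 1)
        (((a.drop 1).length : Int) - (a.drop 1).count 1) f t) := by
  have htail : ∀ x ∈ a.drop 1, x = 0 ∨ x = 1 := fun x hx => ha x (List.mem_of_mem_drop hx)
  have hcnt := count_zero_add_count_one (a.drop 1) htail
  have hfall : ∀ x ∈ a.map (fun x => (1:Int) - x), x = 0 ∨ x = 1 := by
    intro x hx
    simp only [List.mem_map] at hx
    obtain ⟨y, hy, rfl⟩ := hx
    rcases ha y hy with h | h <;> omega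
  have hdmap : (a.map (fun x => (1:Int) - x)).drop 1 = (a.drop 1).map (fun x => 1 - x) := by
    simp
  intro fuel
  induction fuel with
  | zero =>
    intro todo done f t hlen ht happ
    have : todo = [] := List.length_eq_zero_iff.mp (by omega)
    subst this
    rcases ht with rfl | rfl <;> rfl
  | succ fuel ih =>
    intro todo done f t hlen ht happ
    match todo with
    | [] => rcases ht with rfl | rfl <;> rfl
    | v :: r =>
      rcases ht with rfl | rfl
      · -- parity 0: the zipper holds the original array a
        rw [if_neg (by norm_num)] at happ ⊢
        have hv01 : v = 0 ∨ v = 1 := ha v (by rw [← happ]; simp)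
        by_cases hv0 : v = 0
        · -- current cell 0: both sides skip it
          rw [outerGo, if_pos hv0]
          have H := ih r (done ++ [v]) f 0 (by simp at hlen ⊢; omega) (Or.inl rfl)
            (by rw [List.append_assoc]; exact happ)
          rw [if_neg (by norm_num)] at H
          rw [H, altLoop, if_neg (by simp [hv0])]
        · have hv1 : v = 1 := hv01.resolve_left hv0
          by_cases hm : (1 : Int) ∈ a.drop 1
          · -- a 1 remains after cell 0: free this prisoner and flip everything
            have hd1 : ∀ x ∈ done ++ [v], x = 0 ∨ x = 1 := by
              intro x hx
              refine ha x ?_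
              rw [← happ]
              simp only [List.mem_append, List.mem_cons] at hx ⊢
              tauto
            have hr1 : ∀ x ∈ r, x = 0 ∨ x = 1 := by
              intro x hx
              exact ha x (by rw [← happ]; simp [hx])
            rw [outerGo_flip fuel done _ _ v r f hv0
              (by rw [happ]; exact not_not_intro hm)
              (flipGo_spec _ hd1) (flipGo_spec _ hr1)]
            have H := ih (r.map (fun x => 1 - x)) ((done ++ [v]).map (fun x => 1 - x))
              (f + 1) 1 (by simp at hlen ⊢; omega) (Or.inr rfl)
              (by rw [if_pos rfl, ← List.map_append, List.append_assoc]
                  exact congrArg _ happ)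
            rw [if_pos rfl, map_flip_flip] at H
            rw [H, altLoop, if_pos (by simp [hv1])]
            have hone : ((a.drop 1).count 1 : Int) ≠ 0 := by
              have := List.count_pos_iff.mpr hm; omega
            rw [if_pos rfl, if_neg hone]
            norm_num
          · -- no 1 left after cell 0: last prisoner freed, return f + 1
            rw [outerGo, if_neg hv0, happ, if_pos hm]
            rw [altLoop, if_pos (by simp [hv1])]
            have hz : ((a.drop 1).count 1 : Int) = 0 := by
              exact_mod_cast List.count_eq_zero.mpr hm
            rw [if_pos rfl, if_pos hz]
      · -- parity 1: the zipper holds the once-flipped array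
        rw [if_pos rfl] at happ ⊢
        have haeq : (done ++ v :: r).map (fun x => 1 - x) = a := by
          rw [happ, map_flip_flip]
        have hv01 : v = 0 ∨ v = 1 := hfall v (by rw [← happ]; simp)
        rw [List.map_cons]
        by_cases hv0 : v = 0
        · -- current cell holds 0 only: both sides skip (original cell was 1)
          rw [outerGo, if_pos hv0]
          have H := ih r (done ++ [v]) f 1 (by simp at hlen ⊢; omega) (Or.inr rfl)
            (by rw [if_pos rfl, List.append_assoc]; exact happ)
          rw [if_pos rfl] at H
          rw [H, altLoop, if_neg (by simp [hv0])]
        · have hv1 : v = 1 := hv01.resolve_left hv0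
          have hmemiff : ((1 : Int) ∈ (done ++ v :: r).drop 1) ↔ (0 : Int) ∈ a.drop 1 := by
            rw [happ, hdmap, mem_one_map_flip]
          by_cases hm0 : (0 : Int) ∈ a.drop 1
          · -- a 1 remains in the flipped tail: free, flip back
            have hd1 : ∀ x ∈ done ++ [v], x = 0 ∨ x = 1 := by
              intro x hx
              refine hfall x ?_
              rw [← happ]
              simp only [List.mem_append, List.mem_cons] at hx ⊢
              tauto
            have hr1 : ∀ x ∈ r, x = 0 ∨ x = 1 := by
              intro x hx
              exact hfall x (by rw [← happ]; simp [hx])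
            rw [outerGo_flip fuel done _ _ v r f hv0
              (not_not_intro (hmemiff.mpr hm0))
              (flipGo_spec _ hd1) (flipGo_spec _ hr1)]
            have H := ih (r.map (fun x => 1 - x)) ((done ++ [v]).map (fun x => 1 - x))
              (f + 1) 0 (by simp at hlen ⊢; omega) (Or.inl rfl)
              (by rw [if_neg (by norm_num), ← List.map_append, List.append_assoc]
                  exact haeq)
            rw [if_neg (by norm_num)] at H
            rw [H, altLoop, if_pos (by simp [hv1])]
            have hzne : (((a.drop 1).length : Int) - (a.drop 1).count 1) ≠ 0 := by
              have := List.count_pos_iff.mpr hm0; omega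
            rw [if_neg (show ¬(1:Int) = 0 by norm_num), if_neg hzne]
            norm_num
          · -- no 1 left in the flipped array's tail: last prisoner, return f + 1
            rw [outerGo, if_neg hv0, if_pos (by rw [hmemiff]; exact hm0)]
            rw [altLoop, if_pos (by simp [hv1])]
            have hz : (((a.drop 1).length : Int) - (a.drop 1).count 1) = 0 := by
              have : (a.drop 1).count 0 = 0 := List.count_eq_zero.mpr hm0
              omega
            rw [if_neg (show ¬(1:Int) = 0 by norm_num), if_pos hz]

-- ===== VERDICT (by name: the statement is the Claim_ definition above) =====
theorem freed_prisoner_spec : Claim_equal_freed_prisoner := by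
  intro prison _ hpre
  obtain ⟨hne, hcase⟩ := hpre
  obtain ⟨v, rest, rfl⟩ : ∃ v rest, prison = v :: rest := by
    cases prison with
    | nil => exact absurd rfl hne
    | cons v rest => exact ⟨v, rest, rfl⟩
  unfold Spec_freed_prisoner freed_prisoner freed_prisoner_alt
  rw [PySem.List.pyGet?_zero_cons]
  dsimp only
  by_cases hv : v = 0
  · simp [hv]
  · rw [if_neg hv, if_neg hv]
    simp only [List.headI] at hcase
    by_cases hmem : (1 : Int) ∈ (v :: rest).drop 1
    · -- the full simulation case: every cell must be 0 or 1
      have hall : ∀ x ∈ v :: rest, x = 0 ∨ x = 1 := by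
        rcases hcase with h | h | h
        · exact absurd h hv
        · exact absurd hmem h
        · exact h
      have hv1 : v = 1 := by rcases hall v (by simp) with h | h; exact absurd h hv; exact h
      have hrall : ∀ x ∈ rest, x = 0 ∨ x = 1 := fun x hx => hall x (by simp [hx])
      -- first iteration: cell 0 is occupied, a 1 remains, so flip and recurse
      rw [show (v :: rest).length = rest.length + 1 from rfl,
        outerGo_flip rest.length [] _ _ v rest 0 hv
          (by simpa using hmem)
          (flipGo_spec _ (by intro x hx; simp at hx; subst hx; simp [hv1]))
          (flipGo_spec _ hrall)]
      have H := outer_eq_alt (v :: rest) hall rest.length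
        (rest.map (fun x => 1 - x)) ([v].map (fun x => 1 - x)) 1 1
        (by simp) (Or.inr rfl)
        (by rw [if_pos rfl, ← List.map_append]; rfl)
      rw [if_pos rfl, map_flip_flip] at H
      simp only [zero_add, List.nil_append]
      rw [H, Option.getD_some]
      rw [if_neg (by simpa using hmem)]
      simp [PySem.List.count]
    · -- no 1 after cell 0: both return 1 immediately
      rw [if_pos (by simpa using hmem)]
      rw [show (v :: rest).length = rest.length + 1 from rfl, outerGo,
        if_neg (by simpa using hv), if_pos (by simpa using hmem)]
      simp
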